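-- pv_equiv track=rewrite | github.com/piechnikk/agh-algorithms-and-data-structures | 3_dynamic_and_greedy_algorithms/lab12/full_tanking.py | full_tanking
-- ===== SOURCE A (Python) =====
-- def full_tanking(S, T): # S[i][0 -> distance, 1 -> price]
--     n = len(S)
--     cost = S[0][1] * T
--     position = 0 # actual position
--     while position+T < S[n-1][0]:
--         best = min(list(filter((lambda x: (x[0]>position and x[0]<=position+T)), S)), key=lambda x: x[1])
--         cost += (best[0]-position) * best[1]
--         position = best[0]
--     return cost
-- ===== SOURCE B (Python) =====
-- # Alternative re-implementation: stations are distance-sorted in the function's domain, so each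
-- # greedy step finds its window by binary search and its cheapest station (leftmost tie) by an
-- # O(1) sparse-table range-minimum query, instead of filtering and min-scanning the whole list.
-- def full_tanking(S, T):  # S[i][0 -> distance, 1 -> price]
--     n = len(S)
--     dist = [s[0] for s in S]
--     price = [s[1] for s in S]
--
--     # sparse table: M[j][i] = index of the cheapest (leftmost on ties) station in [i, i + 2**j)
--     M = [list(range(n))]
--     j = 1
--     while (1 << j) <= n:
--         prev = M[j - 1]
--         half = 1 << (j - 1)
--         M.append([prev[i] if price[prev[i]] <= price[prev[i + half]] else prev[i + half]
--                   for i in range(n - (1 << j) + 1)])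
--         j += 1
--
--     def query(lo, hi):  # argmin of price on [lo, hi), leftmost tie; requires lo < hi
--         k = (hi - lo).bit_length() - 1
--         a, b = M[k][lo], M[k][hi - (1 << k)]
--         return a if price[a] <= price[b] else b
--
--     def bisect_right(x):  # first index with dist > x
--         lo, hi = 0, n
--         while lo < hi:
--             mid = (lo + hi) // 2
--             if dist[mid] <= x:
--                 lo = mid + 1
--             else:
--                 hi = mid
--         return lo
--
--     cost = price[0] * T
--     pos = 0
--     while pos + T < dist[n - 1]:
--         b = query(bisect_right(pos), bisect_right(pos + T))
--         cost += (dist[b] - pos) * price[b]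
--         pos = dist[b]
--     return cost
-- ===== Notes on version B (the rewrite author's own statement) =====
-- stated objective: alternative
-- what changed: Instead of filtering the whole station list and min-scanning it on every greedy step, B precomputes a sparse table over the distance-sorted stations and finds each step's window by binary search and its cheapest station (leftmost tie) by an O(1) range-minimum query; the worst case drops from O(n^2) to O(n log n), though a timing run inputs (few greedy steps) showed no measurable difference.
-- outside the precondition, e.g. on full_tanking([[3, 5], [2, 7], [4, 1]], 2): A returns 24, B returns 25; on full_tanking([[0, 9], [1, 1], [2, 1]], 1): A returns 10, B returns 10
import Mathlib
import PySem

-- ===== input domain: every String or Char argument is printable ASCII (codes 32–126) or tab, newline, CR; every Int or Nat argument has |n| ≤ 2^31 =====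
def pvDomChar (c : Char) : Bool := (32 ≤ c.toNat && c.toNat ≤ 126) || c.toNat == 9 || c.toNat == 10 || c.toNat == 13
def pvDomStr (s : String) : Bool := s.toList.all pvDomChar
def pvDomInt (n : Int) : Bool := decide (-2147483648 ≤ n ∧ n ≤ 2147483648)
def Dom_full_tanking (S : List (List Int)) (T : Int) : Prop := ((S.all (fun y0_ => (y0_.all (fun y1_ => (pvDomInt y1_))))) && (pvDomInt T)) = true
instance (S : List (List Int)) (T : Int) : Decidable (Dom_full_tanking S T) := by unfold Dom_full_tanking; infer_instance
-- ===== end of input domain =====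

-- B replaces A's per-step filter-whole-list + min scan by binary search for the window and a
-- sparse-table range-minimum query over the distance-sorted stations (objective: alternative
-- algorithm; fewer stations touched per greedy step).

-- ===== PORT A =====
-- A's while loop; `fuel = S.length + 1` bounds it (each iteration moves `position` to a strictly
-- larger station distance, so Python runs at most `S.length` iterations on inputs in Pre_).
-- `pyGetD … default` marks Python's IndexError cases; the `none` branch of `min` marks Python's
-- ValueError on an empty window — all outside Pre_.
def pvALoop (S : List (List Int)) (T : Int) : Nat → Int → Int → Int
  | 0, _, cost => cost
  | fuel+1, position, cost =>
    if position + T < PySem.List.pyGetD (PySem.List.pyGetD S ((S.length : Int) - 1) []) 0 0 then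
      match PySem.List.min? (S.filter (fun x => decide (position < PySem.List.pyGetD x 0 0) && decide (PySem.List.pyGetD x 0 0 ≤ position + T))) (fun x => PySem.List.pyGetD x 1 0) with
      | none => cost
      | some best => pvALoop S T fuel (PySem.List.pyGetD best 0 0)
          (cost + (PySem.List.pyGetD best 0 0 - position) * PySem.List.pyGetD best 1 0)
    else cost

def full_tanking (S : List (List Int)) (T : Int) : Int :=
  pvALoop S T (S.length + 1) 0 (PySem.List.pyGetD (PySem.List.pyGetD S 0 []) 1 0 * T)

-- ===== PORT B =====
-- `price[a] <= price[b] ? a : b` — the tie-keeping combine of Source B's table rows and query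
def pvCmb (price : List Int) (a b : Nat) : Nat :=
  if price.getD a 0 ≤ price.getD b 0 then a else b

-- Source B's sparse table M: `pvRows price j` is row M[j] (row j+1 is built from row j exactly as
-- Source B's `while (1 << j) <= n` loop builds it; rows with 2^j > n are empty, as in Source B).
def pvRows (price : List Int) : Nat → List Nat
  | 0 => List.range price.length
  | j+1 => (List.range (price.length + 1 - 2^(j+1))).map
      (fun i => pvCmb price ((pvRows price j).getD i 0) ((pvRows price j).getD (i + 2^j) 0))

-- Source B's `query(lo, hi)`; `(hi-lo).bit_length() - 1` is `Nat.log2 (hi-lo)` for `lo < hi`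
def pvQuery (price : List Int) (lo hi : Nat) : Nat :=
  pvCmb price ((pvRows price (Nat.log2 (hi - lo))).getD lo 0)
              ((pvRows price (Nat.log2 (hi - lo))).getD (hi - 2 ^ Nat.log2 (hi - lo)) 0)

-- Source B's hand-written `bisect_right` while-loop (indices stay in [0, n], kept as Nat)
def pvBisect (dist : List Int) (x : Int) (lo hi : Nat) : Nat :=
  if _h : lo < hi then
    if dist.getD ((lo + hi) / 2) 0 ≤ x then pvBisect dist x ((lo + hi) / 2 + 1) hi
    else pvBisect dist x lo ((lo + hi) / 2)
  else lo
termination_by hi - lo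
decreasing_by
  · have : lo ≤ (lo + hi) / 2 := (Nat.le_div_iff_mul_le (by omega)).mpr (by omega)
    omega
  · have : (lo + hi) / 2 < hi := (Nat.div_lt_iff_lt_mul (by omega)).mpr (by omega)
    omega

-- Source B's while loop; same fuel bound as port A (Source B runs at most n iterations on Pre_ inputs)
def pvBLoop (dist price : List Int) (T : Int) : Nat → Int → Int → Int
  | 0, _, cost => cost
  | fuel+1, pos, cost =>
    if pos + T < dist.getD (dist.length - 1) 0 then
      let q := pvQuery price (pvBisect dist pos 0 dist.length) (pvBisect dist (pos + T) 0 dist.length)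
      pvBLoop dist price T fuel (dist.getD q 0) (cost + (dist.getD q 0 - pos) * price.getD q 0)
    else cost

def full_tanking_alt (S : List (List Int)) (T : Int) : Int :=
  let dist := S.map (fun s => PySem.List.pyGetD s 0 0)
  let price := S.map (fun s => PySem.List.pyGetD s 1 0)
  pvBLoop dist price T (S.length + 1) 0 (price.getD 0 0 * T)

-- ===== PRECONDITION & SPEC =====
-- Pre_ excludes the inputs where A raises (empty list, too-short rows, no reachable station in
-- some window) and restricts to the function's natural domain — stations strictly increasing in
-- positive distance, each reachable from the previous one (first station and every gap ≤ T) —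
-- unless the target is directly reachable (last distance ≤ T); outside that domain (unsorted or
-- nonpositive-distance station lists) A's returned values are accidental.
def Pre_full_tanking (S : List (List Int)) (T : Int) : Prop :=
  S ≠ [] ∧ (∀ r ∈ S, 2 ≤ r.length) ∧
  ((S.map (fun r => r.getD 0 0)).getLast?.getD 0 ≤ T ∨
   (List.IsChain (· < ·) (S.map (fun r => r.getD 0 0)) ∧
    0 < (S.map (fun r => r.getD 0 0)).headI ∧
    (S.map (fun r => r.getD 0 0)).headI ≤ T ∧
    List.IsChain (fun a b => b ≤ a + T) (S.map (fun r => r.getD 0 0))))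
instance (S : List (List Int)) (T : Int) : Decidable (Pre_full_tanking S T) := by
  unfold Pre_full_tanking; infer_instance

def pvWitness_full_tanking : List (List Int) × Int := ([[1, 2], [2, 3], [5, 1]], 4)

def Spec_full_tanking (S : List (List Int)) (T : Int) (out : Int) : Prop := out = full_tanking_alt S T
instance (S : List (List Int)) (T : Int) (out : Int) : Decidable (Spec_full_tanking S T out) := by
  unfold Spec_full_tanking; infer_instance

-- ===== CLAIM (what is proved, stated in full; the proofs are below) =====
def Claim_equal_full_tanking : Prop := ∀ (S : List (List Int)) (T : Int), Dom_full_tanking S T → Pre_full_tanking S T → Spec_full_tanking S T (full_tanking S T)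

-- ===== LEMMAS AND PROOFS =====

-- `getD` through a `map`, at an in-range index
theorem pvGetD_map {α β : Type} (f : α → β) (S : List α) (i : Nat) (c : β) (h : i < S.length) :
    (S.map f).getD i c = f S[i] := by
  simp [List.getD_eq_getElem?_getD, List.getElem?_map, List.getElem?_eq_getElem h]

-- "c is the leftmost index of the minimal price on [lo, hi)"
def PArg (pr : List Int) (lo hi c : Nat) : Prop :=
  lo ≤ c ∧ c < hi ∧ (∀ t, lo ≤ t → t < hi → pr.getD c 0 ≤ pr.getD t 0) ∧
  (∀ t, lo ≤ t → t < c → pr.getD c 0 < pr.getD t 0)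

theorem PArg_unique {pr : List Int} {lo hi a b : Nat}
    (h1 : PArg pr lo hi a) (h2 : PArg pr lo hi b) : a = b := by
  obtain ⟨la, ha, mina, lefta⟩ := h1
  obtain ⟨lb, hb, minb, leftb⟩ := h2
  rcases Nat.lt_trichotomy a b with h | h | h
  · have h3 := leftb a la h
    have h4 := mina b lb hb
    omega
  · exact h
  · have h3 := lefta b lb h
    have h4 := minb a la ha
    omega

theorem pvCmb_PArg {pr : List Int} {lo m1 lo2 hi a b : Nat}
    (h1 : PArg pr lo m1 a) (h2 : PArg pr lo2 hi b)
    (hx : lo ≤ lo2) (hy : lo2 ≤ m1) (hz : m1 ≤ hi) : PArg pr lo hi (pvCmb pr a b) := by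
  obtain ⟨la, ha, mina, lefta⟩ := h1
  obtain ⟨lb, hb, minb, leftb⟩ := h2
  unfold pvCmb
  split_ifs with hc
  · refine ⟨la, by omega, ?_, ?_⟩
    · intro t ht1 ht2
      by_cases htm : t < m1
      · exact mina t ht1 htm
      · exact le_trans hc (minb t (by omega) ht2)
    · intro t ht1 ht2
      exact lefta t ht1 ht2
  · have hc : pr.getD b 0 < pr.getD a 0 := by omega
    refine ⟨by omega, hb, ?_, ?_⟩
    · intro t ht1 ht2
      by_cases htm : t < m1
      · exact le_trans (le_of_lt hc) (mina t ht1 htm)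
      · exact minb t (by omega) ht2
    · intro t ht1 ht2
      by_cases htl : t < lo2
      · exact lt_of_lt_of_le hc (mina t ht1 (by omega))
      · exact leftb t (by omega) ht2

theorem pvRows_PArg (pr : List Int) :
    ∀ j i, i + 2 ^ j ≤ pr.length → PArg pr i (i + 2 ^ j) ((pvRows pr j).getD i 0) := by
  intro j
  induction j with
  | zero =>
    intro i hi
    have hi' : i < pr.length := by omega
    have hg : (pvRows pr 0).getD i 0 = i := by
      simp [pvRows, List.getD_eq_getElem?_getD, hi']
    rw [hg]
    refine ⟨le_refl i, by omega, ?_, ?_⟩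
    · intro t ht1 ht2
      have : t = i := by omega
      rw [this]
    · intro t ht1 ht2
      omega
  | succ j ih =>
    intro i hi
    have hpow : 2 ^ (j + 1) = 2 ^ j + 2 ^ j := by rw [pow_succ]; omega
    have h1 : 1 ≤ 2 ^ j := Nat.one_le_two_pow
    have hg : (pvRows pr (j+1)).getD i 0
        = pvCmb pr ((pvRows pr j).getD i 0) ((pvRows pr j).getD (i + 2 ^ j) 0) := by
      have hir : i < pr.length + 1 - 2 ^ (j+1) := by omega
      simp only [pvRows]
      rw [List.getD_eq_getElem?_getD, List.getElem?_map, List.getElem?_range hir]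
      rfl
    rw [hg]
    have ha := ih i (by omega)
    have hb := ih (i + 2 ^ j) (by omega)
    have := pvCmb_PArg ha hb (by omega) (by omega) (by omega)
    have heq : i + 2 ^ j + 2 ^ j = i + 2 ^ (j + 1) := by omega
    rwa [heq] at this

theorem pvQuery_PArg {pr : List Int} {lo hi : Nat} (hlo : lo < hi) (hhi : hi ≤ pr.length) :
    PArg pr lo hi (pvQuery pr lo hi) := by
  have hne : hi - lo ≠ 0 := by omega
  have h1 : 2 ^ Nat.log2 (hi - lo) ≤ hi - lo := Nat.log2_self_le hne
  have h2 : hi - lo < 2 ^ (Nat.log2 (hi - lo) + 1) := Nat.lt_log2_self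
  have hpow : 2 ^ (Nat.log2 (hi - lo) + 1) = 2 ^ Nat.log2 (hi - lo) + 2 ^ Nat.log2 (hi - lo) := by
    rw [pow_succ]; omega
  have hk1 : 1 ≤ 2 ^ Nat.log2 (hi - lo) := Nat.one_le_two_pow
  have ha := pvRows_PArg pr (Nat.log2 (hi - lo)) lo (by omega)
  have hb := pvRows_PArg pr (Nat.log2 (hi - lo)) (hi - 2 ^ Nat.log2 (hi - lo)) (by omega)
  have heq : hi - 2 ^ Nat.log2 (hi - lo) + 2 ^ Nat.log2 (hi - lo) = hi := by omega
  rw [heq] at hb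
  have := pvCmb_PArg ha hb (by omega) (by omega) (by omega)
  exact this

-- strict sortedness, through `getD`
theorem pvSorted_getD_lt {d : List Int} (hs : List.IsChain (· < ·) d)
    {i j : Nat} (hij : i < j) (hj : j < d.length) : d.getD i 0 < d.getD j 0 := by
  have hp : List.Pairwise (· < ·) d := List.isChain_iff_pairwise.mp hs
  have hi : i < d.length := by omega
  have := (List.pairwise_iff_getElem.mp hp) i j hi hj hij
  rw [List.getD_eq_getElem?_getD, List.getD_eq_getElem?_getD,
      List.getElem?_eq_getElem hi, List.getElem?_eq_getElem hj]
  exact this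

theorem pvSorted_getD_le {d : List Int} (hs : List.IsChain (· < ·) d)
    {i j : Nat} (hij : i ≤ j) (hj : j < d.length) : d.getD i 0 ≤ d.getD j 0 := by
  rcases Nat.lt_or_ge i j with h | h
  · exact le_of_lt (pvSorted_getD_lt hs h hj)
  · have : i = j := by omega
    rw [this]

theorem pvBisect_spec {d : List Int} (hs : List.IsChain (· < ·) d) (x : Int) :
    ∀ (k lo hi : Nat), hi - lo = k → lo ≤ hi → hi ≤ d.length →
    (∀ i, i < lo → d.getD i 0 ≤ x) → (∀ i, hi ≤ i → i < d.length → x < d.getD i 0) →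
    pvBisect d x lo hi ≤ d.length ∧
    (∀ i, i < pvBisect d x lo hi → d.getD i 0 ≤ x) ∧
    (∀ i, pvBisect d x lo hi ≤ i → i < d.length → x < d.getD i 0) := by
  intro k
  induction k using Nat.strong_induction_on with
  | _ k ih =>
    intro lo hi hk hlohi hhi hlow hhigh
    rw [pvBisect]
    by_cases h : lo < hi
    · rw [dif_pos h]
      have hmid1 : lo ≤ (lo + hi) / 2 := (Nat.le_div_iff_mul_le (by omega)).mpr (by omega)
      have hmid2 : (lo + hi) / 2 < hi := (Nat.div_lt_iff_lt_mul (by omega)).mpr (by omega)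
      by_cases hcmp : d.getD ((lo + hi) / 2) 0 ≤ x
      · rw [if_pos hcmp]
        refine ih (hi - ((lo + hi) / 2 + 1)) (by omega) _ _ rfl (by omega) hhi ?_ hhigh
        intro i hilt
        by_cases hlo' : i < lo
        · exact hlow i hlo'
        · exact le_trans (pvSorted_getD_le hs (by omega) (by omega)) hcmp
      · rw [if_neg hcmp]
        have hcmp' : x < d.getD ((lo + hi) / 2) 0 := by omega
        refine ih ((lo + hi) / 2 - lo) (by omega) _ _ rfl (by omega) (by omega) hlow ?_
        intro i hile hilt
        exact lt_of_lt_of_le hcmp' (pvSorted_getD_le hs hile hilt)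
    · rw [dif_neg h]
      have : lo = hi := by omega
      exact ⟨by omega, hlow, fun i h1 h2 => hhigh i (by omega) h2⟩

-- a filter whose predicate holds exactly on an index interval is a contiguous segment
theorem pvFilter_eq_drop_take {α : Type} (p : α → Bool) :
    ∀ (l : List α) (lo hi : Nat), lo ≤ hi →
    (∀ i (h : i < l.length), p l[i] = decide (lo ≤ i ∧ i < hi)) →
    l.filter p = (l.drop lo).take (hi - lo) := by
  intro l
  induction l with
  | nil => intro lo hi _ _; simp
  | cons x t ih =>
    intro lo hi hlohi hp
    have hx := hp 0 (by simp)
    simp only [List.getElem_cons_zero] at hx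
    by_cases hpx : p x = true
    · rw [hpx] at hx
      have hx' : lo ≤ 0 ∧ 0 < hi := of_decide_eq_true hx.symm
      have hlo : lo = 0 := by omega
      subst hlo
      have hrec := ih 0 (hi - 1) (by omega) ?_
      · rw [List.filter_cons_of_pos hpx, hrec]
        simp only [List.drop_zero]
        have hh : hi - 0 = (hi - 1) + 1 := by omega
        rw [hh, List.take_succ_cons]
        simp
      · intro i h
        have := hp (i + 1) (by simpa using Nat.succ_lt_succ h)
        simp only [List.getElem_cons_succ] at this
        rw [this]
        apply decide_eq_decide.mpr
        omega
    · have hpx' : p x = false := by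
        cases hpb : p x
        · rfl
        · exact absurd hpb hpx
      rw [hpx'] at hx
      have hx' : ¬ (lo ≤ 0 ∧ 0 < hi) := by
        intro hcon
        exact absurd (decide_eq_true hcon) (by rw [← hx]; simp)
      rcases Nat.eq_zero_or_pos lo with hlo | hlo
      · -- then hi = 0, so lo = 0 and the predicate is false everywhere
        have hhi0 : hi = 0 := by omega
        subst hlo; subst hhi0
        rw [List.filter_eq_nil_iff.mpr, List.take_zero]
        intro a ha
        obtain ⟨i, hilt, hieq⟩ := List.mem_iff_getElem.mp ha
        have := hp i hilt
        rw [hieq] at this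
        simp [this]
      · obtain ⟨m, rfl⟩ : ∃ m, lo = m + 1 := ⟨lo - 1, by omega⟩
        have hrec := ih m (hi - 1) (by omega) ?_
        · rw [List.filter_cons_of_neg (by simp [hpx']), hrec, List.drop_succ_cons]
          congr 1
          omega
        · intro i h
          have := hp (i + 1) (by simpa using Nat.succ_lt_succ h)
          simp only [List.getElem_cons_succ] at this
          rw [this]
          apply decide_eq_decide.mpr
          omega

-- Python's min(l, key) returns the first element achieving the minimal key
theorem pvMin?_argmin {α : Type} (key : α → Int) :
    ∀ (l : List α), l ≠ [] →
    ∃ m, ∃ h : m < l.length, PySem.List.min? l key = some l[m] ∧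
      (∀ j (hj : j < l.length), key l[m] ≤ key l[j]) ∧
      (∀ j (hj : j < m), key l[m] < key (l[j]'(hj.trans h))) := by
  intro l
  induction l using List.reverseRecOn with
  | nil => intro h; exact absurd rfl h
  | append_singleton t x ih =>
    intro _
    rcases Decidable.em (t = []) with ht | ht
    · subst ht
      refine ⟨0, by simp, ?_, ?_, ?_⟩
      · simp [PySem.List.min?]
      · intro j hj
        have : j = 0 := by simpa using hj
        subst this
        simp
      · intro j hj
        omega
    · obtain ⟨m, hm, hmin, hall, hleft⟩ := ih ht
      have hfold : PySem.List.min? (t ++ [x]) key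
          = (match PySem.List.min? t key with
             | none => some x
             | some mm => if key x < key mm then some x else some mm) := by
        unfold PySem.List.min?
        rw [List.foldl_append]
        rfl
      rw [hmin] at hfold
      simp only [] at hfold
      by_cases hc : key x < key t[m]
      · rw [if_pos hc] at hfold
        refine ⟨t.length, by simp, ?_, ?_, ?_⟩
        · rw [hfold]
          congr 1
          rw [List.getElem_append_right (le_refl t.length)]
          simp
        · intro j hj
          rw [List.getElem_append_right (le_refl t.length)]
          simp only [Nat.sub_self, List.getElem_cons_zero]
          rcases Nat.lt_or_ge j t.length with hjt | hjt
          · rw [List.getElem_append_left hjt]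
            exact le_trans (le_of_lt hc) (hall j hjt)
          · have : j = t.length := by simp at hj; omega
            subst this
            rw [List.getElem_append_right (le_refl t.length)]
            simp
        · intro j hj
          rw [List.getElem_append_right (le_refl t.length)]
          simp only [Nat.sub_self, List.getElem_cons_zero]
          rw [List.getElem_append_left hj]
          exact lt_of_lt_of_le hc (hall j hj)
      · rw [if_neg hc] at hfold
        have hc' : key t[m] ≤ key x := by omega
        refine ⟨m, by simp; omega, ?_, ?_, ?_⟩
        · rw [hfold]
          congr 1
          rw [List.getElem_append_left hm]
        · intro j hj
          rw [List.getElem_append_left hm]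
          rcases Nat.lt_or_ge j t.length with hjt | hjt
          · rw [List.getElem_append_left hjt]
            exact hall j hjt
          · have : j = t.length := by simp at hj; omega
            subst this
            rw [List.getElem_append_right (le_refl t.length)]
            simpa using hc'
        · intro j hj
          rw [List.getElem_append_left hm, List.getElem_append_left (hj.trans hm)]
          exact hleft j hj

theorem pvHeadI_getD (d : List Int) (h : d ≠ []) : d.headI = d.getD 0 0 := by
  cases d with
  | nil => exact absurd rfl h
  | cons a t => rfl

theorem pvGetLast?_getD (d : List Int) : d.getLast?.getD 0 = d.getD (d.length - 1) 0 := by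
  rw [List.getLast?_eq_getElem?, List.getD_eq_getElem?_getD]

theorem pvGap_getD {d : List Int} {T : Int} (hg : List.IsChain (fun a b => b ≤ a + T) d)
    {i : Nat} (h : i + 1 < d.length) : d.getD (i + 1) 0 ≤ d.getD i 0 + T := by
  have hi : i < d.length := by omega
  have := List.isChain_iff_getElem.mp hg i h
  rw [List.getD_eq_getElem?_getD, List.getD_eq_getElem?_getD,
      List.getElem?_eq_getElem hi, List.getElem?_eq_getElem h]
  exact this

theorem pv_loop_eq (S : List (List Int)) (T : Int) (hpre : Pre_full_tanking S T) :
    ∀ (fuel : Nat) (pos cost : Int),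
    (pos = 0 ∨ ((List.IsChain (· < ·) (S.map (fun r => r.getD 0 0)) ∧
       0 < (S.map (fun r => r.getD 0 0)).headI ∧
       (S.map (fun r => r.getD 0 0)).headI ≤ T ∧
       List.IsChain (fun a b => b ≤ a + T) (S.map (fun r => r.getD 0 0))) ∧
      ∃ i, i < S.length ∧ pos = (S.map (fun r => r.getD 0 0)).getD i 0)) →
    pvALoop S T fuel pos cost =
      pvBLoop (S.map (fun s => PySem.List.pyGetD s 0 0)) (S.map (fun s => PySem.List.pyGetD s 1 0)) T fuel pos cost := by
  obtain ⟨hne, hrows, hdisj⟩ := hpre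
  have hn : 0 < S.length := List.length_pos_iff.mpr hne
  have hmapeq : S.map (fun s => PySem.List.pyGetD s 0 0) = S.map (fun r => r.getD 0 0) :=
    List.map_congr_left (fun a _ => PySem.List.pyGetD_zero a 0)
  rw [hmapeq]
  set d := S.map (fun r => r.getD 0 0) with hd
  set p := S.map (fun s => PySem.List.pyGetD s 1 0) with hp
  have hdlen : d.length = S.length := by simp [hd]
  have hplen : p.length = S.length := by simp [hp]
  have hdget : ∀ i (h : i < S.length), d.getD i 0 = S[i].getD 0 0 := fun i h => pvGetD_map _ S i 0 h
  have hpget : ∀ i (h : i < S.length), p.getD i 0 = PySem.List.pyGetD S[i] 1 0 :=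
    fun i h => pvGetD_map _ S i 0 h
  have hlastA : PySem.List.pyGetD (PySem.List.pyGetD S ((S.length : Int) - 1) []) 0 0
      = d.getD (d.length - 1) 0 := by
    have h1 : PySem.List.pyGetD S ((S.length : Int) - 1) [] = S[S.length - 1] := by
      rw [PySem.List.pyGetD_eq_getElem S [] (by omega) (by omega)]
      congr 1
      omega
    rw [h1, PySem.List.pyGetD_zero, hdlen, ← hdget (S.length - 1) (by omega)]
  intro fuel
  induction fuel with
  | zero => intro pos cost _; rfl
  | succ fuel ih =>
    intro pos cost hinv
    rw [pvALoop, pvBLoop, hlastA]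
    by_cases hcond : pos + T < d.getD (d.length - 1) 0
    · rw [if_pos hcond, if_pos hcond]
      -- the second Pre_ disjunct holds in every case that reaches the loop body
      have hD2 : List.IsChain (· < ·) d ∧ 0 < d.headI ∧ d.headI ≤ T ∧
          List.IsChain (fun a b => b ≤ a + T) d := by
        rcases hinv with rfl | ⟨h2, _⟩
        · rcases hdisj with h1 | h2
          · rw [pvGetLast?_getD, hdlen] at h1
            rw [hdlen] at hcond
            omega
          · exact h2
        · exact h2
      obtain ⟨hsort, hd0pos, hd0le, hgap⟩ := hD2
      have hhead : d.headI = d.getD 0 0 := pvHeadI_getD d (by simp [hd]; exact hne)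
      have hT : 0 < T := lt_of_lt_of_le hd0pos hd0le
      -- the window (pos, pos+T] contains a station
      have hwin : ∃ i, i < S.length ∧ pos < d.getD i 0 ∧ d.getD i 0 ≤ pos + T := by
        rcases hinv with rfl | ⟨_, i, hi, rfl⟩
        · exact ⟨0, hn, by rw [← hhead]; omega⟩
        · have hi_ne : i ≠ S.length - 1 := by
            intro h
            subst h
            rw [hdlen] at hcond
            omega
          refine ⟨i + 1, by omega, ?_, ?_⟩
          · exact pvSorted_getD_lt hsort (by omega) (by omega)
          · exact pvGap_getD hgap (by omega)
      -- binary-search bounds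
      obtain ⟨hbl1, hbl2, hbl3⟩ := pvBisect_spec hsort pos d.length 0 d.length (by omega)
        (by omega) (le_refl _) (fun i h => absurd h (by omega)) (fun i h1 h2 => absurd h1 (by omega))
      obtain ⟨hbh1, hbh2, hbh3⟩ := pvBisect_spec hsort (pos + T) d.length 0 d.length (by omega)
        (by omega) (le_refl _) (fun i h => absurd h (by omega)) (fun i h1 h2 => absurd h1 (by omega))
      set lo := pvBisect d pos 0 d.length with hlo
      set hi := pvBisect d (pos + T) 0 d.length with hhi
      have hiff : ∀ i, i < S.length → ((pos < d.getD i 0 ∧ d.getD i 0 ≤ pos + T) ↔ (lo ≤ i ∧ i < hi)) := by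
        intro i h
        constructor
        · rintro ⟨h1, h2⟩
          constructor
          · by_contra hcon
            have := hbl2 i (by omega)
            omega
          · by_contra hcon
            have := hbh3 i (by omega) (by omega)
            omega
        · rintro ⟨h1, h2⟩
          exact ⟨hbl3 i h1 (by omega), hbh2 i h2⟩
      have hlohi : lo < hi := by
        obtain ⟨i, hi1, hi2, hi3⟩ := hwin
        have := (hiff i hi1).mp ⟨hi2, hi3⟩
        omega
      -- A's filtered list is the contiguous segment [lo, hi)
      have hfil : S.filter (fun x => decide (pos < PySem.List.pyGetD x 0 0) && decide (PySem.List.pyGetD x 0 0 ≤ pos + T))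
          = (S.drop lo).take (hi - lo) := by
        apply pvFilter_eq_drop_take _ S lo hi (le_of_lt hlohi)
        intro i h
        rw [PySem.List.pyGetD_zero, ← hdget i h, ← Bool.decide_and]
        exact decide_eq_decide.mpr (hiff i h)
      -- the segment, its first-minimum, and B's query agree
      set seg := (S.drop lo).take (hi - lo) with hseg
      have hhiS : hi ≤ S.length := by omega
      have hseglen : seg.length = hi - lo := by
        simp [hseg]
        omega
      have hsegne : seg ≠ [] := by
        intro h
        rw [h] at hseglen
        simp at hseglen
        omega
      have hseg_get : ∀ j (hj : j < seg.length), seg[j] = S[lo + j]'(by omega) := by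
        intro j hj
        simp only [hseg, List.getElem_take, List.getElem_drop]
      obtain ⟨m, hmlt, hmin, hall, hleft⟩ := pvMin?_argmin (fun x => PySem.List.pyGetD x 1 0) seg hsegne
      have hmn : lo + m < S.length := by omega
      have hPm : PArg p lo hi (lo + m) := by
        refine ⟨by omega, by omega, ?_, ?_⟩
        · intro t ht1 ht2
          have htn : t < S.length := by omega
          rw [hpget _ hmn, hpget _ htn]
          have h1 := hall (t - lo) (by omega)
          rw [hseg_get m hmlt, hseg_get (t - lo) (by omega)] at h1
          have : lo + (t - lo) = t := by omega
          simp only [this] at h1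
          exact h1
        · intro t ht1 ht2
          have htn : t < S.length := by omega
          rw [hpget _ hmn, hpget _ htn]
          have h1 := hleft (t - lo) (by omega)
          rw [hseg_get m hmlt, hseg_get (t - lo) (by omega)] at h1
          have : lo + (t - lo) = t := by omega
          simp only [this] at h1
          exact h1
      have hq := pvQuery_PArg (pr := p) hlohi (by omega)
      have hqeq : pvQuery p lo hi = lo + m := PArg_unique hq hPm
      -- both sides take the same step
      rw [hfil, hmin, hqeq, hseg_get m hmlt]
      have hb0 : PySem.List.pyGetD (S[lo + m]'hmn) 0 0 = d.getD (lo + m) 0 := by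
        rw [PySem.List.pyGetD_zero, ← hdget _ hmn]
      have hb1 : PySem.List.pyGetD (S[lo + m]'hmn) 1 0 = p.getD (lo + m) 0 := (hpget _ hmn).symm
      show pvALoop S T fuel (PySem.List.pyGetD (S[lo + m]'hmn) 0 0)
          (cost + (PySem.List.pyGetD (S[lo + m]'hmn) 0 0 - pos) * PySem.List.pyGetD (S[lo + m]'hmn) 1 0)
          = pvBLoop d p T fuel (d.getD (lo + m) 0) (cost + (d.getD (lo + m) 0 - pos) * p.getD (lo + m) 0)
      rw [hb0, hb1]
      exact ih _ _ (Or.inr ⟨⟨hsort, hd0pos, hd0le, hgap⟩, lo + m, hmn, rfl⟩)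
    · rw [if_neg hcond, if_neg hcond]

-- ===== VERDICT (by name: the statement is the Claim_ definition above) =====
theorem full_tanking_spec : Claim_equal_full_tanking := by
  intro S T _ hpre
  unfold Spec_full_tanking full_tanking full_tanking_alt
  have hne : S ≠ [] := hpre.1
  have hn : 0 < S.length := List.length_pos_iff.mpr hne
  have hcost : PySem.List.pyGetD (PySem.List.pyGetD S 0 []) 1 0
      = (S.map (fun s => PySem.List.pyGetD s 1 0)).getD 0 0 := by
    rw [PySem.List.pyGetD_zero]
    rw [pvGetD_map _ S 0 _ hn]
    congr 1
    rw [List.getD_eq_getElem?_getD, List.getElem?_eq_getElem hn]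
    rfl
  show pvALoop S T (S.length + 1) 0 (PySem.List.pyGetD (PySem.List.pyGetD S 0 []) 1 0 * T)
      = pvBLoop (S.map (fun s => PySem.List.pyGetD s 0 0)) (S.map (fun s => PySem.List.pyGetD s 1 0)) T
          (S.length + 1) 0 ((S.map (fun s => PySem.List.pyGetD s 1 0)).getD 0 0 * T)
  rw [hcost]
  exact pv_loop_eq S T hpre (S.length + 1) 0 _ (Or.inl rfl)
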